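-- pv_equiv track=rewrite | github.com/SaintLawrenceIslandYupik/finite_state_morphology | build_morpheme_lexicon.py | convert_to_cv
-- ===== SOURCE A (Python) =====
-- def tokenize(word):
--     '''
--     :param word: the word to tokenize into graphemes
--     :type word: str
--
--     :return: list
--
--     Tokenizes a given Yupik word into its respective graphemes
--
--     '''
--     GRAPHEMES = ['Ngngw', 'ngngw', 'Ghhw', 'ghhw', 'Ngng', 'ngng',
--                  'Ghh', 'gh', 'Ghw', 'ghw', 'Ngw', 'ngw',
--                  'Gg', 'gg', 'Gh', 'gh', 'Kw', 'kw', 'Ll', 'll',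
--                  'Mm', 'mm', 'Ng', 'ng', 'Nn', 'nn', 'Qw', 'qw',
--                  'Rr', 'rr', 'Wh', 'wh',
--                  'Aa', 'aa', 'Ii', 'ii', 'Uu', 'uu',
--                  'A', 'a', 'E', 'e', 'F', 'f', 'G', 'g', 'H', 'h',
--                  'I', 'i', 'K', 'k', 'L', 'l', 'M', 'm', 'N', 'n',
--                  'P', 'p', 'Q', 'q', 'R', 'r', 'S', 's', 'T', 't',
--                  'U', 'u', 'V', 'v', 'W', 'w', 'Y', 'y', 'Z', 'z']
--
--     result = []
--
--     end = len(word)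
--     while end > 0:
--         foundGrapheme = False
--
--         # attempts to greedy match graphemes starting
--         # from the end of the word
--         for grapheme in GRAPHEMES:
--             if word.endswith(grapheme, 0, end):
--                 result.insert(0, grapheme)
--                 end -= len(grapheme)
--                 foundGrapheme = True
--                 break
--
--         # if a grapheme was not found, just prepend
--         # the character to the final result
--         if not foundGrapheme:
--             result.insert(0, word[end-1:end])
--             end -= 1
--
--     return result
--
-- def convert_to_cv(word):
--     '''
--     :param word: the word to convert
--     :type word: str
--
--     :return: list of tuples
--
--     Converts the given word into C(onsonant)s and V(owel)s
--
--     '''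
--     CONSONANTS = ['Ngngw', 'ngngw', 'Ghhw', 'ghhw', 'Ngng', 'ngng',
--                   'Ghh', 'gh', 'Ghw', 'ghw', 'Ngw', 'ngw',
--                   'Gg', 'gg', 'Gh', 'gh', 'Kw', 'kw', 'Ll', 'll',
--                   'Mm', 'mm', 'Ng', 'ng', 'Nn', 'nn', 'Qw', 'qw',
--                   'Rr', 'rr', 'Wh', 'wh',
--                   'F', 'f', 'G', 'g', 'H', 'h', 'K', 'k', 'L', 'l',
--                   'M', 'm', 'N', 'n', 'P', 'p', 'Q', 'q', 'R', 'r',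
--                   'S', 's', 'T', 't', 'V', 'v', 'W', 'w', 'Y', 'y', 'Z', 'z']
--
--     FULL_VOWELS = ['A', 'a', 'I', 'i', 'U', 'u']
--
--     tokenized = tokenize(word)
--
--     result = []
--
--     for grapheme in tokenized:
--         if grapheme in CONSONANTS:
--             result.append((grapheme, "C"))
--         elif grapheme in FULL_VOWELS:
--             result.append((grapheme, "V"))
--         else:
--             result.append((grapheme, grapheme))
--
--     return result
-- ===== SOURCE B (Python) =====
-- def convert_to_cv(word):
--     # Different algorithm: instead of scanning the 76-entry grapheme list with
--     # endswith at every position (and a second relabelling pass), walk the word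
--     # right-to-left once and, at each position, look up the at-most-5 candidate
--     # suffix substrings in a precomputed dict mapping each grapheme to its first
--     # list index and its label; pick the candidate with the smallest index
--     # (= the first match in A's list order) and emit the labelled tuple at once.
--     GRAPHEMES = ['Ngngw', 'ngngw', 'Ghhw', 'ghhw', 'Ngng', 'ngng',
--                  'Ghh', 'gh', 'Ghw', 'ghw', 'Ngw', 'ngw',
--                  'Gg', 'gg', 'Gh', 'gh', 'Kw', 'kw', 'Ll', 'll',
--                  'Mm', 'mm', 'Ng', 'ng', 'Nn', 'nn', 'Qw', 'qw',
--                  'Rr', 'rr', 'Wh', 'wh',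
--                  'Aa', 'aa', 'Ii', 'ii', 'Uu', 'uu',
--                  'A', 'a', 'E', 'e', 'F', 'f', 'G', 'g', 'H', 'h',
--                  'I', 'i', 'K', 'k', 'L', 'l', 'M', 'm', 'N', 'n',
--                  'P', 'p', 'Q', 'q', 'R', 'r', 'S', 's', 'T', 't',
--                  'U', 'u', 'V', 'v', 'W', 'w', 'Y', 'y', 'Z', 'z']
--     VOWELS = {'A', 'a', 'I', 'i', 'U', 'u'}
--     SELF_LABELLED = {'Aa', 'aa', 'Ii', 'ii', 'Uu', 'uu', 'E', 'e'}
--     INFO = {}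
--     for i, g in enumerate(GRAPHEMES):
--         if g not in INFO:
--             INFO[g] = (i, "V" if g in VOWELS else (g if g in SELF_LABELLED else "C"))
--     out = []
--     end = len(word)
--     while end > 0:
--         best = None
--         for k in range(1, min(5, end) + 1):
--             s = word[end - k:end]
--             info = INFO.get(s)
--             if info is not None and (best is None or info[0] < best[0]):
--                 best = (info[0], s, info[1])
--         if best is None:
--             s = word[end - 1:end]
--             out.append((s, s))
--             end -= 1
--         else:
--             _, s, lab = best
--             out.append((s, lab))
--             end -= len(s)
--     out.reverse()
--     return out
-- ===== Notes on version B (the rewrite author's own statement) =====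
-- stated objective: faster
-- what changed: A scans the 76-entry grapheme list with endswith at every position and then relabels the token list in a second pass; B walks the word right-to-left once, looks up the at-most-5 candidate suffix substrings in a dict precomputed from grapheme to (first list index, label), takes the index-minimal candidate (= A's first match in list order) and emits the labelled tuple immediately, reversing at the end.
import Mathlib
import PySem

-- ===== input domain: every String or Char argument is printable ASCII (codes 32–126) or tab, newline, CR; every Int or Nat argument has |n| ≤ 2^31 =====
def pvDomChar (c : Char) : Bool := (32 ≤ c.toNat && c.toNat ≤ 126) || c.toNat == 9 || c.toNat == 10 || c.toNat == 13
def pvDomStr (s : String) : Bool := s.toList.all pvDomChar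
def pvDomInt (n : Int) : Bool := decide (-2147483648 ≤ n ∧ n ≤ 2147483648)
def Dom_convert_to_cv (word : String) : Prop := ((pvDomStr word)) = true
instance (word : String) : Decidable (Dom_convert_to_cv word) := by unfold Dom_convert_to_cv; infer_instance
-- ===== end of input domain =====

-- B replaces A's scan of the 76-entry grapheme list with endswith at every position (plus a second
-- relabelling pass) by one right-to-left pass that looks the ≤5 candidate suffix substrings up in a
-- first-index dict and takes the smallest index, labelling each tuple immediately.

-- ===== PORT A =====
def pvGraphemes : List String :=
  ["Ngngw", "ngngw", "Ghhw", "ghhw", "Ngng", "ngng",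
   "Ghh", "gh", "Ghw", "ghw", "Ngw", "ngw",
   "Gg", "gg", "Gh", "gh", "Kw", "kw", "Ll", "ll",
   "Mm", "mm", "Ng", "ng", "Nn", "nn", "Qw", "qw",
   "Rr", "rr", "Wh", "wh",
   "Aa", "aa", "Ii", "ii", "Uu", "uu",
   "A", "a", "E", "e", "F", "f", "G", "g", "H", "h",
   "I", "i", "K", "k", "L", "l", "M", "m", "N", "n",
   "P", "p", "Q", "q", "R", "r", "S", "s", "T", "t",
   "U", "u", "V", "v", "W", "w", "Y", "y", "Z", "z"]

-- every grapheme is nonempty (used only for termination of the while loop below)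
theorem pvGraphemes_pos : ∀ g ∈ pvGraphemes, 0 < g.toList.length := by decide

-- the while loop of tokenize, recursing on `end`; the for-with-break is List.find?;
-- word.endswith(g, 0, end) is exact as Chars.endswith on (take end); word[end-1:end] is exact as drop (end-1) (take end)
def pvTokenizeAux (cs : List Char) : Nat → List String
  | 0 => []
  | e + 1 =>
    match hf : pvGraphemes.find? (fun g => PySem.Chars.endswith (cs.take (e + 1)) g.toList) with
    | some g => pvTokenizeAux cs (e + 1 - g.toList.length) ++ [g]
    | none => pvTokenizeAux cs e ++ [String.ofList ((cs.take (e + 1)).drop e)]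
  termination_by e => e
  decreasing_by
    · have := pvGraphemes_pos g (List.mem_of_find?_eq_some hf)
      omega
    · omega

def tokenize (word : String) : List String :=
  pvTokenizeAux word.toList word.toList.length

def pvConsonants : List String :=
  ["Ngngw", "ngngw", "Ghhw", "ghhw", "Ngng", "ngng",
   "Ghh", "gh", "Ghw", "ghw", "Ngw", "ngw",
   "Gg", "gg", "Gh", "gh", "Kw", "kw", "Ll", "ll",
   "Mm", "mm", "Ng", "ng", "Nn", "nn", "Qw", "qw",
   "Rr", "rr", "Wh", "wh",
   "F", "f", "G", "g", "H", "h", "K", "k", "L", "l",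
   "M", "m", "N", "n", "P", "p", "Q", "q", "R", "r",
   "S", "s", "T", "t", "V", "v", "W", "w", "Y", "y", "Z", "z"]

def pvFullVowels : List String := ["A", "a", "I", "i", "U", "u"]

-- body of A's relabelling for-loop: the if/elif/else chain, in source order
def pvF (g : String) : String × String :=
  if g ∈ pvConsonants then (g, "C") else if g ∈ pvFullVowels then (g, "V") else (g, g)

def convert_to_cv (word : String) : List (String × String) :=
  (tokenize word).foldl (fun result g => result ++ [pvF g]) []

-- ===== PORT B =====
def pvVowelSet : PySem.Set String := PySem.Set.ofList ["A", "a", "I", "i", "U", "u"]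
def pvSelfSet : PySem.Set String := PySem.Set.ofList ["Aa", "aa", "Ii", "ii", "Uu", "uu", "E", "e"]

-- INFO = {g: (first index, label)}: 'for i, g in enumerate(GRAPHEMES): if g not in INFO: INFO[g] = ...'
def pvInfo : PySem.Dict String (Int × String) :=
  (PySem.List.enumerate pvGraphemes).foldl
    (fun d p =>
      if d.contains p.2 then d
      else d.insert p.2
        (p.1, if PySem.Set.contains pvVowelSet p.2 then "V"
              else if PySem.Set.contains pvSelfSet p.2 then p.2 else "C"))
    PySem.Dict.empty

-- candidate at trailing length k: s = word[end-k:end]; INFO.get(s) paired with s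
def pvCand (cs : List Char) (e1 : Nat) (k : Int) : Option (Int × String × String) :=
  let s := String.ofList (PySem.List.slice cs (some ((e1 : Int) - k)) (some (e1 : Int)))
  (pvInfo.get? s).map (fun p => (p.1, s, p.2))

-- loop body: 'if info is not None and (best is None or info[0] < best[0]): best = (info[0], s, info[1])'
def pvStep (cs : List Char) (e1 : Nat) (b : Option (Int × String × String)) (k : Int) :
    Option (Int × String × String) :=
  match pvCand cs e1 k with
  | some v =>
    match b with
    | none => some v
    | some w => if v.1 < w.1 then some v else some w
  | none => b

-- 'for k in range(1, min(5, end) + 1)'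
def pvBest (cs : List Char) (e1 : Nat) : Option (Int × String × String) :=
  (PySem.List.pyRange 1 (min 5 ((e1 : Int)) + 1) 1).foldl (pvStep cs e1) none

-- a best candidate is always a stored (key, value) pair of INFO (needed for termination: keys are nonempty)
theorem pvStep_fold_inv (cs : List Char) (e1 : Nat) (ks : List Int) (b : Option (Int × String × String))
    (hb : ∀ i g l, b = some (i, g, l) → pvInfo.get? g = some (i, l)) :
    ∀ i g l, ks.foldl (pvStep cs e1) b = some (i, g, l) → pvInfo.get? g = some (i, l) := by
  induction ks generalizing b with
  | nil => simpa using hb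
  | cons k ks ih =>
    rw [List.foldl_cons]
    refine ih (pvStep cs e1 b k) ?_
    intro i g l h
    unfold pvStep at h
    cases hc : pvCand cs e1 k with
    | none => rw [hc] at h; exact hb i g l h
    | some v =>
      rw [hc] at h
      simp only [pvCand] at hc
      cases hgs : pvInfo.get? (String.ofList (PySem.List.slice cs (some ((e1 : Int) - k)) (some (e1 : Int)))) with
      | none => rw [hgs] at hc; simp at hc
      | some p =>
        rw [hgs] at hc
        simp only [Option.map_some, Option.some.injEq] at hc
        subst hc
        cases b with
        | none =>
          simp only [Option.some.injEq, Prod.mk.injEq] at h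
          obtain ⟨h1, h2, h3⟩ := h
          subst h1; subst h2; subst h3
          simpa using hgs
        | some w =>
          dsimp only at h
          by_cases hlt : p.1 < w.1
          · rw [if_pos hlt] at h
            simp only [Option.some.injEq, Prod.mk.injEq] at h
            obtain ⟨h1, h2, h3⟩ := h
            subst h1; subst h2; subst h3
            simpa using hgs
          · rw [if_neg hlt] at h
            exact hb i g l h

theorem pvBest_get (cs : List Char) (e1 : Nat) (i : Int) (g lab : String)
    (h : pvBest cs e1 = some (i, g, lab)) : pvInfo.get? g = some (i, lab) :=
  pvStep_fold_inv cs e1 _ none (by simp) i g lab h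

set_option maxRecDepth 10000 in
theorem pvInfoKeys_ok : ∀ g ∈ pvInfo.keys, g ∈ pvGraphemes ∧ 0 < g.toList.length := by decide

theorem pvBest_pos (cs : List Char) (e1 : Nat) (i : Int) (g lab : String)
    (h : pvBest cs e1 = some (i, g, lab)) : 0 < g.toList.length := by
  have hg := pvBest_get cs e1 i g lab h
  have hk : g ∈ pvInfo.keys := by
    rw [← PySem.Dict.contains_iff_mem_keys, PySem.Dict.contains_eq_isSome_get?, hg]
    rfl
  exact (pvInfoKeys_ok g hk).2

-- the fused pass: match-best, label, cons; the appended Python list is reversed at the end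
def pvCvAuxB (cs : List Char) : Nat → List (String × String)
  | 0 => []
  | e + 1 =>
    match hb : pvBest cs (e + 1) with
    | some (_, g, lab) => (g, lab) :: pvCvAuxB cs (e + 1 - g.toList.length)
    | none =>
      let s := String.ofList (PySem.List.slice cs (some ((e + 1 : Int) - 1)) (some (e + 1 : Int)))
      (s, s) :: pvCvAuxB cs e
  termination_by e => e
  decreasing_by
    · have := pvBest_pos cs (e + 1) _ g lab hb
      omega
    · omega

def convert_to_cv_alt (word : String) : List (String × String) :=
  (pvCvAuxB word.toList word.toList.length).reverse

-- ===== PRECONDITION & SPEC =====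
def Spec_convert_to_cv (word : String) (out : List (String × String)) : Prop := out = convert_to_cv_alt word
instance (word : String) (out : List (String × String)) : Decidable (Spec_convert_to_cv word out) := by
  unfold Spec_convert_to_cv; infer_instance

-- ===== CLAIM =====
def Claim_equal_convert_to_cv : Prop := ∀ (word : String), Dom_convert_to_cv word → Spec_convert_to_cv word (convert_to_cv word)

-- ===== LEMMAS AND PROOFS =====

-- one-step equations for the three loops (reduce the dependent match)
theorem pvTok_succ_some (cs : List Char) (e : Nat) (g : String)
    (hf : pvGraphemes.find? (fun g => PySem.Chars.endswith (cs.take (e + 1)) g.toList) = some g) :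
    pvTokenizeAux cs (e + 1) = pvTokenizeAux cs (e + 1 - g.toList.length) ++ [g] := by
  rw [pvTokenizeAux]; split <;> simp_all

theorem pvTok_succ_none (cs : List Char) (e : Nat)
    (hf : pvGraphemes.find? (fun g => PySem.Chars.endswith (cs.take (e + 1)) g.toList) = none) :
    pvTokenizeAux cs (e + 1) = pvTokenizeAux cs e ++ [String.ofList ((cs.take (e + 1)).drop e)] := by
  rw [pvTokenizeAux]; split <;> simp_all

theorem pvCvB_succ_some (cs : List Char) (e : Nat) (i : Int) (g lab : String)
    (hb : pvBest cs (e + 1) = some (i, g, lab)) :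
    pvCvAuxB cs (e + 1) = (g, lab) :: pvCvAuxB cs (e + 1 - g.toList.length) := by
  rw [pvCvAuxB]; split <;> simp_all

theorem pvCvB_succ_none (cs : List Char) (e : Nat) (hb : pvBest cs (e + 1) = none) :
    pvCvAuxB cs (e + 1) =
      (String.ofList (PySem.List.slice cs (some ((e + 1 : Int) - 1)) (some (e + 1 : Int))),
       String.ofList (PySem.List.slice cs (some ((e + 1 : Int) - 1)) (some (e + 1 : Int)))) ::
        pvCvAuxB cs e := by
  rw [pvCvAuxB]; split <;> simp_all

theorem pvF_fst (g : String) : (pvF g).1 = g := by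
  unfold pvF; split_ifs <;> rfl

theorem pvSub_graph : (∀ g ∈ pvConsonants, g ∈ pvGraphemes) ∧ (∀ g ∈ pvFullVowels, g ∈ pvGraphemes) := by
  decide

theorem pvF_not_graph (g : String) (hg : g ∉ pvGraphemes) : pvF g = (g, g) := by
  unfold pvF
  rw [if_neg (fun h => hg (pvSub_graph.1 g h)), if_neg (fun h => hg (pvSub_graph.2 g h))]

theorem pvGraphemes_le5 : ∀ g ∈ pvGraphemes, g.toList.length ≤ 5 := by decide

set_option maxRecDepth 40000 in
theorem pvInfo_get : ∀ g ∈ pvGraphemes, pvInfo.get? g = some ((pvGraphemes.idxOf g : Int), (pvF g).2) := by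
  decide

-- word[end-k:end] is the last-k chunk of the first `end` characters
theorem pvSlice_eq (cs : List Char) (e1 k : Nat) (hk : k ≤ e1) :
    PySem.List.slice cs (some ((e1 : Int) - (k : Int))) (some (e1 : Int)) = (cs.take e1).drop (e1 - k) := by
  have h1 : (e1 : Int) - (k : Int) = ((e1 - k : Nat) : Int) := by omega
  rw [h1, PySem.List.slice_natCast, List.drop_take]

theorem pvSk_len (cs : List Char) (e1 k : Nat) (hk : k ≤ e1) (he : e1 ≤ cs.length) :
    ((cs.take e1).drop (e1 - k)).length = k := by
  simp [List.length_drop, List.length_take]; omega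

-- endswith on the first `end` characters, characterised as a trailing chunk
theorem pvQ_iff (cs : List Char) (e1 : Nat) (he : e1 ≤ cs.length) (s : String) :
    PySem.Chars.endswith (cs.take e1) s.toList = true ↔
      s.toList = (cs.take e1).drop (e1 - s.toList.length) := by
  rw [PySem.Chars.endswith_iff, List.suffix_iff_eq_drop]
  have hlt : (cs.take e1).length = e1 := by simp [List.length_take]; omega
  rw [hlt]

theorem pvQ_len (cs : List Char) (e1 : Nat) (he : e1 ≤ cs.length) (s : String)
    (h : s.toList = (cs.take e1).drop (e1 - s.toList.length)) : s.toList.length ≤ e1 := by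
  have := congrArg List.length h
  simp only [List.length_drop, List.length_take] at this
  omega

-- the first match of find? has the strictly smallest first-occurrence index among all matches
theorem pvFind_first (p : String → Bool) (l : List String) (g x : String)
    (hf : l.find? p = some g) (hx : x ∈ l) (hpx : p x = true) (hne : x ≠ g) :
    l.idxOf g < l.idxOf x := by
  induction l with
  | nil => simp at hf
  | cons a t ih =>
    by_cases hpa : p a = true
    · have hga : g = a := by simp [hpa] at hf; exact hf.symm
      subst hga
      rw [List.idxOf_cons_self, List.idxOf_cons_ne t (Ne.symm hne)]
      omega
    · have hft : t.find? p = some g := by simpa [List.find?_cons, hpa] using hf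
      have hga : g ≠ a := fun h => hpa (h ▸ List.find?_some hft)
      have hxa : x ≠ a := fun h => hpa (h ▸ hpx)
      have hxt : x ∈ t := by rcases List.mem_cons.mp hx with h | h; exact absurd h hxa; exact h
      rw [List.idxOf_cons_ne t (Ne.symm hga), List.idxOf_cons_ne t (Ne.symm hxa)]
      exact Nat.succ_lt_succ (ih hft hxt)

-- the best-so-far survives when no later candidate has a smaller index
theorem pvFold_keep (cs : List Char) (e1 : Nat) (ks : List Int) (v : Int × String × String)
    (hmin : ∀ k ∈ ks, ∀ w, pvCand cs e1 k = some w → v.1 ≤ w.1) :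
    ks.foldl (pvStep cs e1) (some v) = some v := by
  induction ks with
  | nil => rfl
  | cons k ks ih =>
    rw [List.foldl_cons]
    have hstep : pvStep cs e1 (some v) k = some v := by
      unfold pvStep
      cases hc : pvCand cs e1 k with
      | none => rfl
      | some w =>
        have := hmin k List.mem_cons_self w hc
        dsimp only
        rw [if_neg (by omega)]
    rw [hstep]
    exact ih (fun k hk w hw => hmin k (List.mem_cons_of_mem _ hk) w hw)

theorem pvFold_none (cs : List Char) (e1 : Nat) (ks : List Int) (b : Option (Int × String × String))
    (hc : ∀ k ∈ ks, pvCand cs e1 k = none) : ks.foldl (pvStep cs e1) b = b := by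
  induction ks generalizing b with
  | nil => rfl
  | cons k ks ih =>
    rw [List.foldl_cons]
    have hstep : pvStep cs e1 b k = b := by
      unfold pvStep; rw [hc k List.mem_cons_self]
    rw [hstep]
    exact ih b (fun k hk => hc k (List.mem_cons_of_mem _ hk))

-- the fold computes the unique index-minimal candidate
theorem pvFold_min (cs : List Char) (e1 : Nat) (ks : List Int) (v : Int × String × String) (k0 : Int)
    (hk0 : k0 ∈ ks) (hc0 : pvCand cs e1 k0 = some v)
    (hmin : ∀ k ∈ ks, ∀ w, pvCand cs e1 k = some w → v.1 ≤ w.1 ∧ (w.1 = v.1 → w = v)) :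
    ∀ b, (b = none ∨ ∃ w, b = some w ∧ v.1 < w.1) → ks.foldl (pvStep cs e1) b = some v := by
  induction ks with
  | nil => simp at hk0
  | cons k ks ih =>
    intro b hb
    rw [List.foldl_cons]
    cases hc : pvCand cs e1 k with
    | none =>
      have hstep : pvStep cs e1 b k = b := by unfold pvStep; rw [hc]
      have hk0' : k0 ∈ ks := by
        rcases List.mem_cons.mp hk0 with h | h
        · exact absurd (h ▸ hc0) (by rw [hc]; simp)
        · exact h
      rw [hstep]
      exact ih hk0' (fun k hk w hw => hmin k (List.mem_cons_of_mem _ hk) w hw) b hb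
    | some w =>
      have hw := hmin k List.mem_cons_self w hc
      by_cases hwv : w = v
      · subst hwv
        have hstep : pvStep cs e1 b k = some w := by
          unfold pvStep
          rw [hc]
          rcases hb with rfl | ⟨u, rfl, hu⟩
          · rfl
          · dsimp only; rw [if_pos hu]
        rw [hstep]
        exact pvFold_keep cs e1 ks w (fun k hk u hu => (hmin k (List.mem_cons_of_mem _ hk) u hu).1)
      · have hlt : v.1 < w.1 := by
          rcases hw with ⟨hle, heq⟩
          rcases lt_or_eq_of_le hle with h | h
          · exact h
          · exact absurd (heq h.symm) hwv
        have hb' : pvStep cs e1 b k = none ∨ ∃ u, pvStep cs e1 b k = some u ∧ v.1 < u.1 := by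
          unfold pvStep
          rw [hc]
          rcases hb with rfl | ⟨u, rfl, hu⟩
          · exact Or.inr ⟨w, rfl, hlt⟩
          · dsimp only
            split
            · exact Or.inr ⟨w, rfl, hlt⟩
            · exact Or.inr ⟨u, rfl, hu⟩
        have hk0' : k0 ∈ ks := by
          rcases List.mem_cons.mp hk0 with h | h
          · exfalso; rw [h, hc] at hc0; exact hwv (Option.some.inj hc0)
          · exact h
        exact ih hk0' (fun k hk u hu => hmin k (List.mem_cons_of_mem _ hk) u hu) _ hb'

-- candidates are exactly the grapheme matches; the minimal one is A's find? result
theorem pvCand_some_spec (cs : List Char) (e : Nat) (he : e + 1 ≤ cs.length) (k : Int)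
    (hk1 : 1 ≤ k) (hk2 : k ≤ (e + 1 : Nat))
    (w : Int × String × String) (hcw : pvCand cs (e + 1) k = some w) :
    ∃ s : String, s ∈ pvGraphemes ∧
      w = ((pvGraphemes.idxOf s : Int), s, (pvF s).2) ∧
      PySem.Chars.endswith (cs.take (e + 1)) s.toList = true := by
  have hkc : k = (k.toNat : Int) := by omega
  have hkn1 : 1 ≤ k.toNat := by omega
  have hkn2 : k.toNat ≤ e + 1 := by omega
  rw [hkc] at hcw
  simp only [pvCand, pvSlice_eq cs (e + 1) k.toNat hkn2] at hcw
  set s := String.ofList ((cs.take (e + 1)).drop (e + 1 - k.toNat)) with hs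
  rcases Option.map_eq_some_iff.mp hcw with ⟨p, hp, hwp⟩
  have hmem : s ∈ pvInfo.keys := by
    rw [← PySem.Dict.contains_iff_mem_keys, PySem.Dict.contains_eq_isSome_get?, hp]; rfl
  have hsg : s ∈ pvGraphemes := (pvInfoKeys_ok s hmem).1
  have hsl : s.toList = (cs.take (e + 1)).drop (e + 1 - k.toNat) := by
    rw [hs, String.toList_ofList]
  have hslen : s.toList.length = k.toNat := by rw [hsl]; exact pvSk_len cs (e + 1) k.toNat hkn2 he
  refine ⟨s, hsg, ?_, ?_⟩
  · rw [pvInfo_get s hsg] at hp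
    rw [← hwp, ← Option.some.inj hp]
  · rw [pvQ_iff cs (e + 1) he s, hslen]
    exact hsl

theorem pvBest_of_find?_some (cs : List Char) (e : Nat) (he : e + 1 ≤ cs.length) (g : String)
    (hf : pvGraphemes.find? (fun g => PySem.Chars.endswith (cs.take (e + 1)) g.toList) = some g) :
    pvBest cs (e + 1) = some ((pvGraphemes.idxOf g : Int), g, (pvF g).2) := by
  have hg : g ∈ pvGraphemes := List.mem_of_find?_eq_some hf
  have hq : PySem.Chars.endswith (cs.take (e + 1)) g.toList = true := by
    have := List.find?_some (p := fun g : String => PySem.Chars.endswith (cs.take (e + 1)) g.toList) hf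
    simpa using this
  have hn1 : 1 ≤ g.toList.length := pvGraphemes_pos g hg
  have hn5 : g.toList.length ≤ 5 := pvGraphemes_le5 g hg
  have hdrop := (pvQ_iff cs (e + 1) he g).mp hq
  have hne1 : g.toList.length ≤ e + 1 := pvQ_len cs (e + 1) he g hdrop
  unfold pvBest
  refine pvFold_min cs (e + 1) _ _ (g.toList.length : Int) ?_ ?_ ?_ none (Or.inl rfl)
  · rw [PySem.List.mem_pyRange_one]
    constructor
    · omega
    · have : (min 5 ((e + 1 : Nat) : Int)) + 1 = ((min 5 (e + 1) : Nat) : Int) + 1 := by omega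
      rw [this]
      have : g.toList.length ≤ min 5 (e + 1) := by omega
      omega
  · simp only [pvCand, pvSlice_eq cs (e + 1) g.toList.length hne1, ← hdrop,
      String.ofList_toList, pvInfo_get g hg, Option.map_some]
  · intro k hk w hcw
    rw [PySem.List.mem_pyRange_one] at hk
    have hk1 : 1 ≤ k := hk.1
    have hk2 : k ≤ (e + 1 : Nat) := by
      have := hk.2; omega
    obtain ⟨s, hsg, hws, hqs⟩ := pvCand_some_spec cs e he k hk1 hk2 w hcw
    by_cases hsgeq : s = g
    · subst hsgeq
      rw [hws]
      exact ⟨le_refl _, fun _ => rfl⟩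
    · have hidx : pvGraphemes.idxOf g < pvGraphemes.idxOf s :=
        pvFind_first _ pvGraphemes g s hf hsg hqs hsgeq
      rw [hws]
      constructor
      · show ((pvGraphemes.idxOf g : Nat) : Int) ≤ ((pvGraphemes.idxOf s : Nat) : Int)
        exact_mod_cast Nat.le_of_lt hidx
      · intro hcontra
        exfalso
        have : ((pvGraphemes.idxOf s : Nat) : Int) = ((pvGraphemes.idxOf g : Nat) : Int) := hcontra
        omega

theorem pvBest_of_find?_none (cs : List Char) (e : Nat) (he : e + 1 ≤ cs.length)
    (hf : pvGraphemes.find? (fun g => PySem.Chars.endswith (cs.take (e + 1)) g.toList) = none) :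
    pvBest cs (e + 1) = none := by
  unfold pvBest
  apply pvFold_none
  intro k hk
  rw [PySem.List.mem_pyRange_one] at hk
  have hk1 : 1 ≤ k := hk.1
  have hk2 : k ≤ (e + 1 : Nat) := by have := hk.2; omega
  cases hcw : pvCand cs (e + 1) k with
  | none => rfl
  | some w =>
    exfalso
    obtain ⟨s, hsg, _, hqs⟩ := pvCand_some_spec cs e he k hk1 hk2 w hcw
    exact absurd hqs (by simpa using List.find?_eq_none.mp hf s hsg)

-- A's foldl-append loop is a map
theorem pvA_eq_map (word : String) :
    convert_to_cv word = (tokenize word).map pvF := by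
  unfold convert_to_cv
  simpa using PySem.List.foldl_append_singleton_eq_map pvF (tokenize word) []

-- B's fused loop equals (map pvF over A's tokens), reversed
theorem pvB_eq (cs : List Char) : ∀ e, e ≤ cs.length →
    pvCvAuxB cs e = ((pvTokenizeAux cs e).map pvF).reverse := by
  intro e
  induction e using Nat.strong_induction_on with
  | _ e ih =>
    intro he
    match e with
    | 0 => simp [pvCvAuxB, pvTokenizeAux]
    | e + 1 =>
      cases hf : pvGraphemes.find? (fun g => PySem.Chars.endswith (cs.take (e + 1)) g.toList) with
      | some g =>
        have hb := pvBest_of_find?_some cs e he g hf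
        have hpos := pvGraphemes_pos g (List.mem_of_find?_eq_some hf)
        rw [pvCvB_succ_some cs e _ g _ hb, pvTok_succ_some cs e g hf,
          ih (e + 1 - g.toList.length) (by omega) (by omega)]
        simp only [List.map_append, List.map_cons, List.map_nil, List.reverse_append,
          List.reverse_cons, List.reverse_nil, List.nil_append, List.cons_append]
        congr 1
        have h := pvF_fst g
        exact Prod.ext (by simp [h]) rfl
      | none =>
        have hb := pvBest_of_find?_none cs e he hf
        have hcv := pvCvB_succ_none cs e hb
        have hsl := pvSlice_eq cs (e + 1) 1 (by omega)
        push_cast at hsl hcv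
        rw [pvTok_succ_none cs e hf, hcv, hsl, ih e (by omega) (by omega)]
        set s := String.ofList ((cs.take (e + 1)).drop e) with hs
        have hsg : s ∉ pvGraphemes := by
          intro hmem
          have hq : PySem.Chars.endswith (cs.take (e + 1)) s.toList = true := by
            rw [pvQ_iff cs (e + 1) he s]
            have hsl' : s.toList = (cs.take (e + 1)).drop e := by rw [hs, String.toList_ofList]
            have hlen : s.toList.length = 1 := by
              rw [hsl']; exact pvSk_len cs (e + 1) 1 (by omega) he
            rw [hlen, hsl', Nat.add_sub_cancel]
          exact absurd hq (by simpa using List.find?_eq_none.mp hf s hmem)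
        simp only [List.map_append, List.map_cons, List.map_nil, List.reverse_append,
          List.reverse_cons, List.reverse_nil, List.nil_append, List.cons_append]
        rw [pvF_not_graph s hsg]

-- ===== VERDICT =====
theorem convert_to_cv_spec : Claim_equal_convert_to_cv := by
  intro word hdom
  unfold Spec_convert_to_cv convert_to_cv_alt
  rw [pvB_eq word.toList word.toList.length (le_refl _), List.reverse_reverse, pvA_eq_map]
  rfl
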